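-- pv_equiv track=rewrite | github.com/weisongl/Python_Projects | mini_projects/uniform intergers.py | getUniformIntegerCountInInterval
-- ===== SOURCE A (Python) =====
-- def getUniformIntegerCountInInterval(A, B) :
--     b = [1, 2, 3, 4, 5, 6, 7, 8, 9]
--     def check_uniform(n):
--         a = list(str(n))
--         if n < 10:
--             return 1
--         if all(x == a[0] for x in a[1:]):
--             return 1
--         else:
--             return 0
--     output = 0
--     for i in range(A, B + 1):
--         output += check_uniform(i)
--     return output
-- ===== SOURCE B (Python) =====
-- def getUniformIntegerCountInInterval(A, B):
--     # every integer < 10 (including negatives) counts once; above that, the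
--     # uniform integers are exactly d * R for a repunit R in {11, 111, ...} and d in 1..9
--     count = min(B, 9) - A + 1
--     if count < 0:
--         count = 0
--     R = 11
--     while R <= B:
--         for d in range(1, 10):
--             if A <= d * R <= B:
--                 count += 1
--         R = R * 10 + 1
--     return count
-- ===== Notes on version B (the rewrite author's own statement) =====
-- stated objective: faster
-- what changed: Instead of string-testing every integer in [A,B], B counts directly: every integer below 10 in the interval counts once (closed form), and the uniform integers >= 10 are exactly d*R for repunits R = 11, 111, ... and digits d in 1..9, enumerated in a loop over repunits up to B; intended as asymptotically faster (a timing run measured ~740x on the largest wide intervals; near-empty intervals are startup-dominated).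
import Mathlib
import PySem

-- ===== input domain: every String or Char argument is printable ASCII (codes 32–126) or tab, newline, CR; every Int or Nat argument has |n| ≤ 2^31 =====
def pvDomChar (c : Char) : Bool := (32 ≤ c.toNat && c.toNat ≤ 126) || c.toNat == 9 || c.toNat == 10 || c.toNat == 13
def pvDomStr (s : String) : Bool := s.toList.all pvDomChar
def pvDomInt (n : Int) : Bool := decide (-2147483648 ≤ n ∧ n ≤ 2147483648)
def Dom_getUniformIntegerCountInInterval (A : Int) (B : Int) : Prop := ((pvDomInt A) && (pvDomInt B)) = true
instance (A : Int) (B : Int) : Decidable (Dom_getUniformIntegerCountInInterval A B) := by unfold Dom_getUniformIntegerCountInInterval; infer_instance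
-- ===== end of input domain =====

-- B replaces A's per-integer scan of [A,B] with direct counting: every integer < 10 counts
-- once, and the uniform integers ≥ 10 are exactly d·R for a repunit R ∈ {11, 111, …} and a
-- digit d ∈ 1..9 — objective: faster (an O(log B) loop instead of O(B−A) string checks);
-- intended as asymptotically faster: a timing run measured ≈740× on the largest wide
-- intervals, though near-empty intervals are startup-dominated and read ≈1×.


-- ===== PORT A =====
-- check_uniform(n): a = list(str(n)); n < 10 → 1; all(x == a[0] for x in a[1:]) → 1 else 0.
-- (a[0] never raises in A: str(n) is nonempty, so the total pyGetD with a dummy default is exact.)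
def checkUniform (n : Int) : Int :=
  let a := PySem.Int.toChars n
  if n < 10 then 1
  else if (PySem.List.slice a (some 1)).all (fun x => x == PySem.List.pyGetD a 0 ' ') then 1
  else 0

-- (the local 'b = [1,…,9]' in A is dead code and is not ported)
def getUniformIntegerCountInInterval (A : Int) (B : Int) : Int :=
  (PySem.List.pyRange A (B + 1)).foldl (fun output i => output + checkUniform i) 0

-- ===== PORT B =====
-- the 'while R <= B' loop of Source B; R runs over the repunits 11, 111, … (R := R*10+1)
def pvRepLoop (A : Int) (B : Int) (R : Int) (hR : 0 < R) : Int :=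
  if _h : R ≤ B then
    (PySem.List.pyRange 1 10).foldl
      (fun count d => count + if A ≤ d * R ∧ d * R ≤ B then 1 else 0) 0
    + pvRepLoop A B (10 * R + 1) (by omega)
  else 0
termination_by (B + 1 - R).toNat
decreasing_by simp_wf; omega

def getUniformIntegerCountInInterval_alt (A : Int) (B : Int) : Int :=
  let count := min B 9 - A + 1
  let count := if count < 0 then 0 else count
  count + pvRepLoop A B 11 (by norm_num)

-- ===== PRECONDITION & SPEC =====
def Spec_getUniformIntegerCountInInterval (A : Int) (B : Int) (out : Int) : Prop := out = getUniformIntegerCountInInterval_alt A B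
instance (A : Int) (B : Int) (out : Int) : Decidable (Spec_getUniformIntegerCountInInterval A B out) := by unfold Spec_getUniformIntegerCountInInterval; infer_instance

-- ===== CLAIM (what is proved, stated in full; the proofs are below) =====
def Claim_equal_getUniformIntegerCountInInterval : Prop := ∀ (A : Int) (B : Int), Dom_getUniformIntegerCountInInterval A B → Spec_getUniformIntegerCountInInterval A B (getUniformIntegerCountInInterval A B)

-- ===== LEMMAS AND PROOFS =====

-- the chain of R-values of pvRepLoop: pvChain k R = the value after k steps from R
def pvChain : Nat → Int → Int
  | 0, R => R
  | k + 1, R => 10 * pvChain k R + 1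

-- 'some later (or current) R-value of the chain times a digit hits B'
def pvH (R B : Int) : Prop := ∃ d k, 1 ≤ d ∧ d ≤ 9 ∧ d * pvChain k R = B

-- repunits over ℕ: pvRepu L = the L-digit repunit 11…1
def pvRepu : Nat → Nat
  | 0 => 0
  | k + 1 => 10 * pvRepu k + 1

-- the inner 'for d in range(1,10)' count of Source B
def pvCnt (A B R : Int) : Int :=
  (PySem.List.pyRange 1 10).foldl
    (fun count d => count + if A ≤ d * R ∧ d * R ≤ B then 1 else 0) 0

-- number of d ∈ 1..9 with d·R = B
def pvE (R B : Int) : Int :=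
  (PySem.List.pyRange 1 10).foldl (fun count d => count + if d * R = B then 1 else 0) 0

theorem pvRange19 : PySem.List.pyRange 1 10 = [1, 2, 3, 4, 5, 6, 7, 8, 9] := by decide

theorem pvChain_shift (k : Nat) (R : Int) : pvChain k (10 * R + 1) = pvChain (k + 1) R := by
  induction k with
  | zero => rfl
  | succ k ih => simp [pvChain, ih]

theorem pvChain_ge (k : Nat) (R : Int) (hR : 0 < R) : R ≤ pvChain k R := by
  induction k with
  | zero => simp [pvChain]
  | succ k ih => simp only [pvChain]; omega

theorem pvRepLoop_eq (A B R : Int) (hR : 0 < R) :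
    pvRepLoop A B R hR =
      if R ≤ B then pvCnt A B R + pvRepLoop A B (10 * R + 1) (by omega) else 0 := by
  conv_lhs => rw [pvRepLoop]
  by_cases h : R ≤ B
  · rw [dif_pos h, if_pos h]; rfl
  · rw [dif_neg h, if_neg h]

theorem pvRepLoop_zero_of_lt (A B R : Int) (hR : 0 < R) (h : B < R) :
    pvRepLoop A B R hR = 0 := by
  rw [pvRepLoop_eq]; rw [if_neg (by omega)]

theorem pvCnt_split (A B R : Int) (hAB : A ≤ B) :
    pvCnt A B R = pvCnt A (B - 1) R + pvE R B := by
  simp only [pvCnt, pvE, PySem.List.foldl_add, zero_add]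
  rw [← PySem.List.sum_map_add_int]
  apply congrArg
  apply List.map_congr_left
  intro d _
  split_ifs <;> omega

theorem pvCnt_zero (A B R : Int) (h : ∀ d : Int, 1 ≤ d → d ≤ 9 → ¬(A ≤ d * R ∧ d * R ≤ B)) :
    pvCnt A B R = 0 := by
  simp only [pvCnt, pvRange19, List.foldl]
  rw [if_neg (h 1 (by norm_num) (by norm_num)), if_neg (h 2 (by norm_num) (by norm_num)),
      if_neg (h 3 (by norm_num) (by norm_num)), if_neg (h 4 (by norm_num) (by norm_num)),
      if_neg (h 5 (by norm_num) (by norm_num)), if_neg (h 6 (by norm_num) (by norm_num)),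
      if_neg (h 7 (by norm_num) (by norm_num)), if_neg (h 8 (by norm_num) (by norm_num)),
      if_neg (h 9 (by norm_num) (by norm_num))]
  norm_num

theorem pvE_one (B R d : Int) (hR : 0 < R) (h1 : 1 ≤ d) (h9 : d ≤ 9) (hd : d * R = B) :
    pvE R B = 1 := by
  subst hd
  have hc : ∀ x : Int, (x * R = d * R) ↔ x = d := fun x => mul_left_inj' (by omega)
  simp only [pvE, pvRange19, List.foldl, hc]
  interval_cases d <;> decide

theorem pvE_zero (B R : Int) (h : ∀ d : Int, 1 ≤ d → d ≤ 9 → d * R ≠ B) : pvE R B = 0 := by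
  simp only [pvE, pvRange19, List.foldl]
  rw [if_neg (h 1 (by norm_num) (by norm_num)), if_neg (h 2 (by norm_num) (by norm_num)),
      if_neg (h 3 (by norm_num) (by norm_num)), if_neg (h 4 (by norm_num) (by norm_num)),
      if_neg (h 5 (by norm_num) (by norm_num)), if_neg (h 6 (by norm_num) (by norm_num)),
      if_neg (h 7 (by norm_num) (by norm_num)), if_neg (h 8 (by norm_num) (by norm_num)),
      if_neg (h 9 (by norm_num) (by norm_num))]
  norm_num

theorem pvOne_mul_le (d c : Int) (h1 : 1 ≤ d) (hc : 0 < c) : c ≤ d * c := by nlinarith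

-- step lemma when B IS hit by the chain from R
theorem pvLoop_step_hit (A B : Int) (hAB : A ≤ B) :
    ∀ (k : Nat) (R : Int) (hR : 0 < R) (d : Int), 1 ≤ d → d ≤ 9 → d * pvChain k R = B →
      pvRepLoop A B R hR = pvRepLoop A (B - 1) R hR + 1 := by
  intro k
  induction k with
  | zero =>
    intro R hR d h1 h9 hd
    simp only [pvChain] at hd
    have hRB : R ≤ B := hd ▸ pvOne_mul_le d R h1 hR
    have hB9 : B ≤ 9 * R := by nlinarith
    rw [pvRepLoop_eq, if_pos hRB,
        pvRepLoop_zero_of_lt A B (10 * R + 1) (by omega) (by omega),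
        pvCnt_split A B R hAB, pvE_one B R d hR h1 h9 hd]
    rw [pvRepLoop_eq]
    by_cases hRB1 : R ≤ B - 1
    · rw [if_pos hRB1, pvRepLoop_zero_of_lt A (B - 1) (10 * R + 1) (by omega) (by omega)]
      ring
    · -- R = B : the (B-1)-count is empty too
      rw [if_neg hRB1, pvCnt_zero A (B - 1) R (by intro e he1 he9; have := pvOne_mul_le e R he1 hR; omega)]
      ring
  | succ k ih =>
    intro R hR d h1 h9 hd
    rw [← pvChain_shift] at hd
    have hcpos : 0 < 10 * R + 1 := by omega
    have hge : 10 * R + 1 ≤ pvChain k (10 * R + 1) := pvChain_ge k _ hcpos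
    have hchpos : 0 < pvChain k (10 * R + 1) := by omega
    have hBge : 10 * R + 1 ≤ B := le_trans hge (hd ▸ pvOne_mul_le d _ h1 hchpos)
    have hRB : R ≤ B - 1 := by omega
    rw [pvRepLoop_eq, if_pos (by omega : R ≤ B), pvRepLoop_eq A (B-1), if_pos hRB,
        pvCnt_split A B R hAB,
        pvE_zero B R (by intro e he1 he9; nlinarith),
        ih (10 * R + 1) hcpos d h1 h9 hd]
    ring

-- step lemma when B is NOT hit by the chain from R
theorem pvLoop_step_miss (A B : Int) (hAB : A ≤ B) :
    ∀ (n : Nat) (R : Int) (hR : 0 < R), (B + 1 - R).toNat = n → ¬ pvH R B →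
      pvRepLoop A B R hR = pvRepLoop A (B - 1) R hR := by
  intro n
  induction n using Nat.strong_induction_on with
  | _ n ihn =>
    intro R hR hn hH
    by_cases hRB : R ≤ B
    · have hne : R ≠ B := by
        intro h; exact hH ⟨1, 0, by norm_num, by norm_num, by simp [pvChain, h]⟩
      have hRB1 : R ≤ B - 1 := by omega
      have hH' : ¬ pvH (10 * R + 1) B := by
        rintro ⟨d, k, h1, h9, hk⟩
        exact hH ⟨d, k + 1, h1, h9, by rwa [pvChain_shift] at hk⟩
      rw [pvRepLoop_eq, if_pos hRB, pvRepLoop_eq A (B-1), if_pos hRB1,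
          pvCnt_split A B R hAB,
          pvE_zero B R (fun e he1 he9 hd => hH ⟨e, 0, he1, he9, by simpa [pvChain] using hd⟩),
          ihn (B + 1 - (10 * R + 1)).toNat (by omega) (10 * R + 1) (by omega) rfl hH']
      ring
    · rw [pvRepLoop_zero_of_lt A B R hR (by omega),
          pvRepLoop_zero_of_lt A (B - 1) R hR (by omega)]

theorem pvRepLoop_zero_of_empty (A B : Int) (hBA : B < A) :
    ∀ (n : Nat) (R : Int) (hR : 0 < R), (B + 1 - R).toNat = n → pvRepLoop A B R hR = 0 := by
  intro n
  induction n using Nat.strong_induction_on with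
  | _ n ihn =>
    intro R hR hn
    rw [pvRepLoop_eq]
    split_ifs with hRB
    · rw [pvCnt_zero A B R (fun d h1 h9 hc => absurd (le_trans hc.1 hc.2) (by omega)),
          ihn (B + 1 - (10 * R + 1)).toNat (by omega) (10 * R + 1) (by omega) rfl]
      ring
    · rfl

-- ===== the digit characterisation of A's string test =====

theorem pvDigitChar_inj : ∀ a, a < 10 → ∀ b, b < 10 → Nat.digitChar a = Nat.digitChar b → a = b := by
  decide

theorem pvToDigitsCore_eq (f : Nat) :
    ∀ (n : Nat) (ds : List Char), 0 < n → n < f →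
      Nat.toDigitsCore 10 f n ds = ((Nat.digits 10 n).map Nat.digitChar).reverse ++ ds := by
  induction f with
  | zero => intro n ds h1 h2; omega
  | succ f ih =>
    intro n ds h1 h2
    simp only [Nat.toDigitsCore]
    rw [Nat.digits_def' (by norm_num) h1]
    by_cases h0 : n / 10 = 0
    · simp [h0]
    · rw [if_neg h0, ih (n / 10) _ (by omega) (by omega)]
      simp

theorem pvToDigits_eq (n : Nat) (h : 0 < n) :
    Nat.toDigits 10 n = ((Nat.digits 10 n).map Nat.digitChar).reverse := by
  have := pvToDigitsCore_eq (n + 1) n [] h (by omega)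
  simpa [Nat.toDigits] using this

theorem pvOfDigits_replicate (k x : Nat) :
    Nat.ofDigits 10 (List.replicate k x) = x * pvRepu k := by
  induction k with
  | zero => simp [pvRepu]
  | succ k ih =>
    rw [List.replicate_succ, Nat.ofDigits_cons, ih, pvRepu]
    ring

theorem pvChain_repu (k : Nat) : pvChain k 11 = ((pvRepu (k + 2) : Nat) : Int) := by
  induction k with
  | zero => simp [pvChain, pvRepu]
  | succ k ih => simp only [pvChain, pvRepu, ih]; push_cast; ring

-- A's string test, characterised: for B ≥ 10 it is exactly pvH 11 B
theorem pvCheck_hit (B : Int) (hB : 10 ≤ B) (hH : pvH 11 B) : checkUniform B = 1 := by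
  obtain ⟨d, k, h1, h9, hd⟩ := hH
  rw [pvChain_repu] at hd
  have hBn : B = ((d.toNat * pvRepu (k + 2) : Nat) : Int) := by
    push_cast; rw [← hd]; congr 1; omega
  have hdig : Nat.digits 10 B.toNat = List.replicate (k + 2) d.toNat := by
    rw [show B.toNat = d.toNat * pvRepu (k + 2) by omega, ← pvOfDigits_replicate]
    apply Nat.digits_ofDigits 10 (by norm_num)
    · intro l hl
      rw [List.eq_of_mem_replicate hl]; omega
    · intro hne
      rw [List.getLast_replicate]; omega
  simp only [checkUniform]
  rw [if_neg (by omega)]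
  have hchars : PySem.Int.toChars B = List.replicate (k + 2) (Nat.digitChar d.toNat) := by
    simp only [PySem.Int.toChars]
    rw [if_neg (by omega), pvToDigits_eq B.toNat (by omega), hdig]
    simp [List.map_replicate, List.reverse_replicate]
  rw [hchars, if_pos]
  rw [PySem.List.slice_from _ (by norm_num)]
  have : PySem.List.pyGetD (List.replicate (k + 2) (Nat.digitChar d.toNat)) 0 ' '
      = Nat.digitChar d.toNat := by
    rw [show k + 2 = (k + 1) + 1 from rfl, List.replicate_succ, PySem.List.pyGetD_zero_cons]
  rw [this]
  simp only [List.all_eq_true]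
  intro x hx
  have := List.eq_of_mem_replicate (List.mem_of_mem_drop hx)
  simp [this]

theorem pvCheck_miss (B : Int) (hB : 10 ≤ B) (hH : ¬ pvH 11 B) : checkUniform B = 0 := by
  simp only [checkUniform]
  rw [if_neg (by omega), if_neg]
  intro hall
  -- from the all-equal string test, reconstruct a witness of pvH 11 B
  apply hH
  set n := B.toNat with hn
  have hn10 : 10 ≤ n := by omega
  have hL : PySem.Int.toChars B = ((Nat.digits 10 n).map Nat.digitChar).reverse := by
    simp only [PySem.Int.toChars]
    rw [if_neg (by omega), pvToDigits_eq n (by omega)]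
  rw [hL, PySem.List.slice_from _ (by norm_num)] at hall
  rw [← List.map_reverse] at hall
  obtain ⟨x, t, hxt⟩ := List.exists_cons_of_ne_nil
    (show (Nat.digits 10 n).reverse ≠ [] by
      simp [Nat.digits_ne_nil_iff_ne_zero]; omega)
  rw [hxt] at hall
  simp only [Int.toNat_one, List.map_cons, List.drop_succ_cons, List.drop_zero,
    PySem.List.pyGetD_zero_cons, List.all_eq_true, List.mem_map] at hall
  -- every digit equals the leading digit x
  have hdigx : ∀ y ∈ t, y = x := by
    intro y hy
    have hx10 : x < 10 := Nat.digits_lt_base (by norm_num)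
      (by rw [← List.mem_reverse, hxt]; exact List.mem_cons_self)
    have hy10 : y < 10 := Nat.digits_lt_base (by norm_num)
      (by rw [← List.mem_reverse, hxt]; exact List.mem_cons_of_mem _ hy)
    have := hall (Nat.digitChar y) ⟨y, hy, rfl⟩
    exact pvDigitChar_inj y hy10 x hx10 (by simpa using this)
  have hrep : (Nat.digits 10 n).reverse = List.replicate (t.length + 1) x := by
    rw [hxt]
    simp only [List.replicate_succ, List.cons.injEq, true_and]
    exact List.eq_replicate_of_mem hdigx
  have hdig : Nat.digits 10 n = List.replicate (t.length + 1) x := by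
    rw [← List.reverse_reverse (Nat.digits 10 n), hrep, List.reverse_replicate]
  -- length ≥ 2 since n ≥ 10
  have hlen2 : 2 ≤ t.length + 1 := by
    by_contra hlt
    have h1 : (Nat.digits 10 n).length ≤ 1 := by rw [hdig, List.length_replicate]; omega
    have := (Nat.digits_length_le_iff (by norm_num) n).mp h1
    rw [pow_one] at this
    exact absurd (lt_of_le_of_lt hn10 this) (lt_irrefl 10)
  have hx10 : x < 10 := Nat.digits_lt_base (by norm_num)
    (by rw [← List.mem_reverse, hxt]; exact List.mem_cons_self)
  -- n = x * repunit
  have hofd : n = x * pvRepu (t.length + 1) := by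
    conv_lhs => rw [← Nat.ofDigits_digits 10 n]
    rw [hdig, pvOfDigits_replicate]
  -- leading digit x is nonzero since n ≥ 10 > 0
  have hx0 : x ≠ 0 := by rintro rfl; simp at hofd; omega
  refine ⟨(x : Int), t.length - 1, by omega, by omega, ?_⟩
  rw [pvChain_repu, show t.length - 1 + 2 = t.length + 1 by omega]
  omega

-- ===== assembling the two recurrences =====

theorem pvAlt_step (A B : Int) (hAB : A ≤ B) :
    getUniformIntegerCountInInterval_alt A B
      = getUniformIntegerCountInInterval_alt A (B - 1) + checkUniform B := by
  simp only [getUniformIntegerCountInInterval_alt]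
  by_cases hB : B < 10
  · rw [pvRepLoop_zero_of_lt A B 11 (by norm_num) (by omega),
        pvRepLoop_zero_of_lt A (B - 1) 11 (by norm_num) (by omega)]
    have hc : checkUniform B = 1 := by simp [checkUniform, if_pos hB]
    rw [hc]
    split_ifs <;> omega
  · have hsm : (if min B 9 - A + 1 < 0 then 0 else min B 9 - A + 1)
        = (if min (B - 1) 9 - A + 1 < 0 then 0 else min (B - 1) 9 - A + 1) := by
      split_ifs <;> omega
    rw [hsm]
    by_cases hH : pvH 11 B
    · obtain ⟨d, k, h1, h9, hd⟩ := hH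
      rw [pvLoop_step_hit A B hAB k 11 (by norm_num) d h1 h9 hd,
          pvCheck_hit B (by omega) ⟨d, k, h1, h9, hd⟩]
      ring
    · rw [pvLoop_step_miss A B hAB (B + 1 - 11).toNat 11 (by norm_num) rfl hH,
          pvCheck_miss B (by omega) hH]
      ring

theorem pvPortA_empty (A B : Int) (h : B < A) : getUniformIntegerCountInInterval A B = 0 := by
  have : PySem.List.pyRange A (B + 1) = [] := by simp [PySem.List.pyRange]; omega
  simp [getUniformIntegerCountInInterval, this]

theorem pvAlt_empty (A B : Int) (h : B < A) : getUniformIntegerCountInInterval_alt A B = 0 := by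
  simp only [getUniformIntegerCountInInterval_alt]
  rw [pvRepLoop_zero_of_empty A B h (B + 1 - 11).toNat 11 (by norm_num) rfl]
  split_ifs <;> omega

theorem pvPortA_step (A B : Int) (hAB : A ≤ B) :
    getUniformIntegerCountInInterval A B
      = getUniformIntegerCountInInterval A (B - 1) + checkUniform B := by
  simp only [getUniformIntegerCountInInterval]
  rw [show B - 1 + 1 = B by ring, PySem.List.pyRange_one_succ_right hAB]
  simp [List.foldl_append]

theorem pvMain (A : Int) : ∀ (B : Int),
    getUniformIntegerCountInInterval A B = getUniformIntegerCountInInterval_alt A B := by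
  suffices h : ∀ (n : Nat) (B : Int), (B + 1 - A).toNat = n →
      getUniformIntegerCountInInterval A B = getUniformIntegerCountInInterval_alt A B by
    exact fun B => h _ B rfl
  intro n
  induction n using Nat.strong_induction_on with
  | _ n ihn =>
    intro B hn
    by_cases hAB : A ≤ B
    · rw [pvPortA_step A B hAB, pvAlt_step A B hAB,
          ihn (B - A).toNat (by omega) (B - 1) (by omega)]
    · rw [pvPortA_empty A B (by omega), pvAlt_empty A B (by omega)]

-- ===== VERDICT (by name: the statement is the Claim_ definition above) =====
theorem getUniformIntegerCountInInterval_spec : Claim_equal_getUniformIntegerCountInInterval := by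
  intro A B _
  unfold Spec_getUniformIntegerCountInInterval
  exact pvMain A B
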